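-- pv_equiv track=rewrite | github.com/TunKedsaro/feed_recommend_hyde | src/functions/utils/llm_client.py | _try_autoclose_json
-- ===== SOURCE A (Python) =====
-- from typing import Any, Dict, Optional, Tuple
--
-- def _try_autoclose_json(text: str) -> Optional[str]:
--     """
--     Attempt a **safe auto-close** for truncated JSON objects.
--
--     What this DOES:
--     - Counts unmatched `{` and `[` (outside of string literals)
--     - Appends missing closing `]` / `}`
--
--     What this DOES NOT:
--     - Invent keys/values
--     - Modify existing content
--     - Repair broken/unclosed strings
--
--     Returns:
--       Repaired JSON string if it looks safe, else None.
--     """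
--     s = (text or "").strip()
--
--     # Only attempt to repair JSON objects. (HyDE bundle schemas are objects.)
--     if not s.startswith("{"):
--         return None
--
--     open_curly = 0
--     open_square = 0
--     in_str = False
--     escape = False
--
--     for ch in s:
--         if escape:
--             escape = False
--             continue
--
--         if ch == "\\" and in_str:
--             escape = True
--             continue
--
--         if ch == '"':
--             in_str = not in_str
--             continue
--
--         # Ignore structure tokens inside string literals.
--         if in_str:
--             continue
--
--         if ch == "{":
--             open_curly += 1
--         elif ch == "}":
--             open_curly = max(0, open_curly - 1)
--         elif ch == "[":
--             open_square += 1
--         elif ch == "]":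
--             open_square = max(0, open_square - 1)
--
--     # Unsafe to repair if a string literal is still open.
--     if in_str:
--         return None
--
--     # Already balanced.
--     if open_curly == 0 and open_square == 0:
--         return s
--
--     # Close arrays first, then objects (mirrors typical nesting).
--     return s + ("]" * open_square) + ("}" * open_curly)
-- ===== SOURCE B (Python) =====
-- from typing import Optional
--
-- def _strip_strings(s: str) -> Optional[str]:
--     """Remove complete JSON string literals; None if a string is unterminated."""
--     out = []
--     i = 0
--     n = len(s)
--     while i < n:
--         c = s[i]
--         if c != '"':
--             out.append(c)
--             i += 1
--             continue
--         i += 1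
--         while i < n:
--             if s[i] == '"':
--                 i += 1
--                 break
--             if s[i] == '\\':
--                 i += 2
--             else:
--                 i += 1
--         else:
--             return None
--     return ''.join(out)
--
-- def _try_autoclose_json(text: str) -> Optional[str]:
--     s = (text or "").strip()
--     if not s.startswith("{"):
--         return None
--     cleaned = _strip_strings(s)
--     if cleaned is None:
--         return None
--     open_curly = 0
--     open_square = 0
--     for ch in cleaned:
--         if ch == "{":
--             open_curly += 1
--         elif ch == "}":
--             open_curly = max(0, open_curly - 1)
--         elif ch == "[":
--             open_square += 1
--         elif ch == "]":
--             open_square = max(0, open_square - 1)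
--     return s + "]" * open_square + "}" * open_curly
-- ===== Notes on version B (the rewrite author's own statement) =====
-- stated objective: alternative
-- what changed: A's single character loop with four pieces of state (two counters, in_str, escape) is split into two phases: a scanner that strips complete JSON string literals (returning None on an unterminated string) followed by a plain clamped bracket counter over the cleaned text, and the balanced special-case branch is dropped since appending zero closers is the identity.
import Mathlib
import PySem

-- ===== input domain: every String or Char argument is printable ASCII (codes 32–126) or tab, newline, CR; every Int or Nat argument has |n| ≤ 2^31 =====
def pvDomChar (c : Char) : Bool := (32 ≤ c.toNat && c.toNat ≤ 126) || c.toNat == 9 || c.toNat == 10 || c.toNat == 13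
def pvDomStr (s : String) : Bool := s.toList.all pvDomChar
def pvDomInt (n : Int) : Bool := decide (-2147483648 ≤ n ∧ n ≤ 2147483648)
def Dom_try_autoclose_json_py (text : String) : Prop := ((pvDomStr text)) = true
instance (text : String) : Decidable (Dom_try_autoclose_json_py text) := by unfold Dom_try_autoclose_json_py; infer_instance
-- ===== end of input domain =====

-- B replaces A's single four-state character loop by two phases (strip string literals, then
-- count brackets on the cleaned text); objective: alternative decomposition, same cost.
-- ===== PORT A =====
-- one step of A's for-loop; state = (open_curly, open_square, in_str, escape)
def aStep (st : Int × Int × Bool × Bool) (ch : Char) : Int × Int × Bool × Bool :=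
  if st.2.2.2 = true then (st.1, st.2.1, st.2.2.1, false)
  else if ch = '\\' ∧ st.2.2.1 = true then (st.1, st.2.1, st.2.2.1, true)
  else if ch = '"' then (st.1, st.2.1, !st.2.2.1, st.2.2.2)
  else if st.2.2.1 = true then st
  else if ch = '{' then (st.1 + 1, st.2.1, st.2.2)
  else if ch = '}' then (max 0 (st.1 - 1), st.2.1, st.2.2)
  else if ch = '[' then (st.1, st.2.1 + 1, st.2.2)
  else if ch = ']' then (st.1, max 0 (st.2.1 - 1), st.2.2)
  else st

def try_autoclose_json_py (text : String) : Option String :=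
  let s := PySem.Str.strip (if text = "" then "" else text)   -- (text or "").strip()
  if ¬ PySem.Str.startswith s "{" = true then none
  else
    let st := s.toList.foldl aStep ((0 : Int), (0 : Int), false, false)
    if st.2.2.1 = true then none                              -- unterminated string
    else if st.1 = 0 ∧ st.2.1 = 0 then some s                 -- already balanced
    -- "]" * open_square + "}" * open_curly (counts are ≥ 0; toNat is exact here)
    else some (String.ofList (s.toList ++ List.replicate st.2.1.toNat ']' ++ List.replicate st.1.toNat '}'))

-- ===== PORT B =====
-- phase 1: remove complete string literals; none = unterminated string
mutual
def altStrip : List Char → Option (List Char)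
  | [] => some []
  | c :: rest => if c = '"' then altConsume rest else (altStrip rest).map (c :: ·)
termination_by l => l.length
decreasing_by all_goals simp
def altConsume : List Char → Option (List Char)
  | [] => none
  | c :: rest =>
      if c = '"' then altStrip rest
      else if c = '\\' then altConsume (rest.drop 1)   -- i += 2
      else altConsume rest
termination_by l => l.length
decreasing_by all_goals simp
end

-- phase 2: one step of B's bracket counter over the cleaned text
def bStep (p : Int × Int) (ch : Char) : Int × Int :=
  if ch = '{' then (p.1 + 1, p.2)
  else if ch = '}' then (max 0 (p.1 - 1), p.2)
  else if ch = '[' then (p.1, p.2 + 1)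
  else if ch = ']' then (p.1, max 0 (p.2 - 1))
  else p

def try_autoclose_json_py_alt (text : String) : Option String :=
  let s := PySem.Str.strip (if text = "" then "" else text)
  if ¬ PySem.Str.startswith s "{" = true then none
  else
    match altStrip s.toList with
    | none => none
    | some cl =>
        let p := cl.foldl bStep ((0 : Int), (0 : Int))
        some (String.ofList (s.toList ++ List.replicate p.2.toNat ']' ++ List.replicate p.1.toNat '}'))

-- ===== PRECONDITION & SPEC =====
def Spec_try_autoclose_json_py (text : String) (out : Option String) : Prop := out = try_autoclose_json_py_alt text
instance (text : String) (out : Option String) : Decidable (Spec_try_autoclose_json_py text out) := by unfold Spec_try_autoclose_json_py; infer_instance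

-- ===== CLAIM (what is proved, stated in full; the proofs are below) =====
def Claim_equal_try_autoclose_json_py : Prop := ∀ (text : String), Dom_try_autoclose_json_py text → Spec_try_autoclose_json_py text (try_autoclose_json_py text)

-- ===== LEMMAS AND PROOFS =====

-- A's loop from a non-string state computes B's two phases; from an in-string state it is altConsume.
theorem master (n : Nat) : ∀ (l : List Char), l.length ≤ n → ∀ (oc os : Int),
    ((∀ cl, altStrip l = some cl →
        l.foldl aStep (oc, os, false, false) =
          ((cl.foldl bStep (oc, os)).1, (cl.foldl bStep (oc, os)).2, false, false)) ∧
      (altStrip l = none → (l.foldl aStep (oc, os, false, false)).2.2.1 = true)) ∧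
    ((∀ cl, altConsume l = some cl →
        l.foldl aStep (oc, os, true, false) =
          ((cl.foldl bStep (oc, os)).1, (cl.foldl bStep (oc, os)).2, false, false)) ∧
      (altConsume l = none → (l.foldl aStep (oc, os, true, false)).2.2.1 = true)) := by
  induction n with
  | zero =>
    intro l hl oc os
    have : l = [] := List.eq_nil_of_length_eq_zero (Nat.le_zero.mp hl)
    subst this
    refine ⟨⟨?_, ?_⟩, ?_, ?_⟩
    · intro cl h; simp [altStrip] at h; subst h; simp [List.foldl]
    · intro h; simp [altStrip] at h
    · intro cl h; simp [altConsume] at h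
    · intro h; simp [List.foldl]
  | succ n ih =>
    intro l hl oc os
    cases l with
    | nil =>
      refine ⟨⟨?_, ?_⟩, ?_, ?_⟩
      · intro cl h; simp [altStrip] at h; subst h; simp [List.foldl]
      · intro h; simp [altStrip] at h
      · intro cl h; simp [altConsume] at h
      · intro h; simp [List.foldl]
    | cons c rest =>
      have hr : rest.length ≤ n := by simpa using Nat.lt_succ_iff.mp (Nat.lt_of_lt_of_le (by simp) hl)
      constructor
      · -- strip side, state (oc, os, false, false)
        by_cases hq : c = '"'
        · subst hq
          have hstep : aStep (oc, os, false, false) '"' = (oc, os, true, false) := by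
            simp [aStep]
          constructor
          · intro cl h
            simp only [altStrip] at h
            simpa [List.foldl_cons, hstep] using ((ih rest hr oc os).2.1 cl h)
          · intro h
            simp only [altStrip] at h
            simpa [List.foldl_cons, hstep] using ((ih rest hr oc os).2.2 h)
        · have hstep : aStep (oc, os, false, false) c =
              ((bStep (oc, os) c).1, (bStep (oc, os) c).2, false, false) := by
            simp only [aStep, bStep]
            split_ifs <;> simp_all
          constructor
          · intro cl h
            simp only [altStrip, if_neg hq, Option.map_eq_some_iff] at h
            obtain ⟨cl', hcl', rfl⟩ := h
            simpa [List.foldl_cons, hstep] using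
              ((ih rest hr (bStep (oc, os) c).1 (bStep (oc, os) c).2).1.1 cl' hcl')
          · intro h
            simp only [altStrip, if_neg hq, Option.map_eq_none_iff] at h
            simpa [List.foldl_cons, hstep] using
              ((ih rest hr (bStep (oc, os) c).1 (bStep (oc, os) c).2).1.2 h)
      · -- consume side, state (oc, os, true, false)
        by_cases hq : c = '"'
        · subst hq
          have hstep : aStep (oc, os, true, false) '"' = (oc, os, false, false) := by
            simp [aStep]
          constructor
          · intro cl h
            simp only [altConsume] at h
            simpa [List.foldl_cons, hstep] using ((ih rest hr oc os).1.1 cl h)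
          · intro h
            simp only [altConsume] at h
            simpa [List.foldl_cons, hstep] using ((ih rest hr oc os).1.2 h)
        · by_cases hb : c = '\\'
          · subst hb
            have hstep : aStep (oc, os, true, false) '\\' = (oc, os, true, true) := by
              simp [aStep]
            constructor
            · intro cl h
              simp only [altConsume, reduceIte] at h
              cases rest with
              | nil => simp [altConsume] at h
              | cons x r =>
                have hr' : r.length ≤ n := by simp at hr; omega
                have hstep2 : aStep (oc, os, true, true) x = (oc, os, true, false) := by
                  simp [aStep]
                simp only [List.drop_one, List.tail_cons] at h
                simpa [List.foldl_cons, hstep, hstep2] using ((ih r hr' oc os).2.1 cl h)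
            · intro h
              simp only [altConsume, reduceIte] at h
              cases rest with
              | nil =>
                have hstep' := hstep
                simp [List.foldl_cons, hstep]
              | cons x r =>
                have hr' : r.length ≤ n := by simp at hr; omega
                have hstep2 : aStep (oc, os, true, true) x = (oc, os, true, false) := by
                  simp [aStep]
                simp only [List.drop_one, List.tail_cons] at h
                simpa [List.foldl_cons, hstep, hstep2] using ((ih r hr' oc os).2.2 h)
          · have hstep : aStep (oc, os, true, false) c = (oc, os, true, false) := by
              simp [aStep, hq, hb]
            constructor
            · intro cl h
              simp only [altConsume, if_neg hq, if_neg hb] at h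
              simpa [List.foldl_cons, hstep] using ((ih rest hr oc os).2.1 cl h)
            · intro h
              simp only [altConsume, if_neg hq, if_neg hb] at h
              simpa [List.foldl_cons, hstep] using ((ih rest hr oc os).2.2 h)

-- ===== VERDICT (by name: the statement is the Claim_ definition above) =====
theorem try_autoclose_json_py_spec : Claim_equal_try_autoclose_json_py := by
  intro text _
  unfold Spec_try_autoclose_json_py try_autoclose_json_py try_autoclose_json_py_alt
  set s := PySem.Str.strip (if text = "" then "" else text) with hs
  cases hstart : PySem.Str.startswith s "{" with
  | false =>
    have hst' : PySem.Chars.startswith s.toList ['{'] = false := by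
      simpa using hstart
    simp [hst']
  | true =>
    have hst' : PySem.Chars.startswith s.toList ['{'] = true := by
      simpa using hstart
    have hM := master s.toList.length s.toList le_rfl 0 0
    cases hcl : altStrip s.toList with
    | none =>
      have h2 := hM.1.2 hcl
      simp [hst', hcl, h2]
    | some cl =>
      have heq := hM.1.1 cl hcl
      by_cases hbal : (cl.foldl bStep ((0:Int), (0:Int))).1 = 0 ∧ (cl.foldl bStep ((0:Int), (0:Int))).2 = 0
      · simp [hst', hcl, heq, hbal.1, hbal.2]
      · simp [hst', hcl, heq, hbal]
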